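-- pv_equiv track=rewrite | github.com/Enthusiasm-c/Monito | modules/enhanced_excel_parser.py | _select_best_sheet
-- ===== SOURCE A (Python) =====
-- from typing import Dict, List, Any, Optional, Tuple
--
-- def _select_best_sheet(sheets_info: Dict[str, Any]) -> Optional[str]:
--     """Выбор лучшего листа для обработки"""
--     if not sheets_info:
--         return None
--
--     # Сначала ищем листы с потенциальными товарами
--     candidates = []
--     for name, info in sheets_info.items():
--         if info.get('potential_products', 0) > 0:
--             score = info['potential_products'] * 10
--             if info.get('duplicated_structure'):
--                 score += 5  # Бонус за двухколоночную структуру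
--             candidates.append((name, score))
--
--     if candidates:
--         candidates.sort(key=lambda x: x[1], reverse=True)
--         return candidates[0][0]
--
--     # Если не нашли, берем первый непустой
--     for name, info in sheets_info.items():
--         if info.get('rows', 0) > 0:
--             return name
--
--     return None
-- ===== SOURCE B (Python) =====
-- def _select_best_sheet(sheets_info):
--     """Single fused pass: keep the running best candidate (strict > keeps the
--     first maximum, matching the stable reverse sort) and the first non-empty
--     sheet as fallback."""
--     best = None
--     first_nonempty = None
--     for name, info in sheets_info.items():
--         pp = info.get('potential_products', 0)
--         if pp > 0:
--             score = pp * 10 + (5 if info.get('duplicated_structure') else 0)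
--             if best is None or score > best[1]:
--                 best = (name, score)
--         if first_nonempty is None and info.get('rows', 0) > 0:
--             first_nonempty = name
--     return best[0] if best is not None else first_nonempty
-- ===== Notes on version B (the rewrite author's own statement) =====
-- stated objective: simpler
-- what changed: Replaced the candidate-list build plus stable reverse sort (and the second fallback loop) by one fused pass that keeps the running best score with a strict > test (so ties keep the first sheet, like the stable sort) and the first non-empty sheet as fallback.
import Mathlib
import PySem

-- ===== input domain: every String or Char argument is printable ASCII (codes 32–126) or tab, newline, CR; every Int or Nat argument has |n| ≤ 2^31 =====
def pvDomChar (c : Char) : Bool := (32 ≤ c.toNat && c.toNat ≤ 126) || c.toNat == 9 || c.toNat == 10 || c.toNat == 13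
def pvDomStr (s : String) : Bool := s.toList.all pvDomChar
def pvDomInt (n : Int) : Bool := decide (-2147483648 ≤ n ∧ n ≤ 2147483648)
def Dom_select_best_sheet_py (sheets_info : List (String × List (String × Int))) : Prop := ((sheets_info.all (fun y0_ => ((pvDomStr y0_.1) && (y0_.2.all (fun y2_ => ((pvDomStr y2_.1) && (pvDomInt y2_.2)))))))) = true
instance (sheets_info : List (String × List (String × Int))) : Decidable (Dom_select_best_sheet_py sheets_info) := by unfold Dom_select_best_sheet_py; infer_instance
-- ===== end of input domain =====

-- B replaces A's candidate-list build + stable reverse sort (and the second fallback loop)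
-- by one fused pass keeping the running best (strict >) and the first non-empty sheet: simpler.


-- ===== PORT A =====
-- literal transliteration of _select_best_sheet: build the candidate list,
-- stable reverse sort by score, take candidates[0][0]; else first sheet with rows > 0.
-- info.get('duplicated_structure') truthiness: values are Ints, truthy iff ≠ 0
-- (a missing key gives None, falsy, exactly like comparing the default 0).
def select_best_sheet_py (sheets_info : List (String × List (String × Int))) : Option String :=
  if sheets_info = [] then none
  else
    let candidates := sheets_info.foldl (fun acc p =>
      if 0 < PySem.Dict.getD (PySem.Dict.mk p.2) "potential_products" (0:Int) then
        let score := PySem.Dict.getD (PySem.Dict.mk p.2) "potential_products" (0:Int) * 10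
        let score := if PySem.Dict.getD (PySem.Dict.mk p.2) "duplicated_structure" (0:Int) ≠ 0 then score + 5 else score
        acc ++ [(p.1, score)]
      else acc) []
    if candidates ≠ [] then
      -- candidates.sort(key=lambda x: x[1], reverse=True); return candidates[0][0] (nonempty here)
      match PySem.List.sorted candidates (fun c => c.2) true with
      | (name, _) :: _ => some name
      | [] => none
    else
      (sheets_info.find? (fun p => 0 < PySem.Dict.getD (PySem.Dict.mk p.2) "rows" (0:Int))).map Prod.fst

-- ===== PORT B =====
-- the loop body of Source B's single pass, on the state (best, first_nonempty)
def pvBStep (st : Option (String × Int) × Option String)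
    (p : String × List (String × Int)) : Option (String × Int) × Option String :=
  let pp := PySem.Dict.getD (PySem.Dict.mk p.2) "potential_products" (0:Int)
  let st :=
    if 0 < pp then
      let score := pp * 10 + (if PySem.Dict.getD (PySem.Dict.mk p.2) "duplicated_structure" (0:Int) ≠ 0 then 5 else 0)
      match st.1 with
      | none => (some (p.1, score), st.2)
      | some b => if score > b.2 then (some (p.1, score), st.2) else st
    else st
  match st.2 with
  | none => if 0 < PySem.Dict.getD (PySem.Dict.mk p.2) "rows" (0:Int) then (st.1, some p.1) else st
  | some _ => st

-- literal transliteration of Source B: one fused pass, state (best, first_nonempty)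
def select_best_sheet_py_alt (sheets_info : List (String × List (String × Int))) : Option String :=
  let st := sheets_info.foldl pvBStep (none, none)
  match st.1 with
  | some b => some b.1
  | none => st.2

-- ===== PRECONDITION & SPEC =====
def Spec_select_best_sheet_py (sheets_info : List (String × List (String × Int))) (out : Option String) : Prop := out = select_best_sheet_py_alt sheets_info
instance (sheets_info : List (String × List (String × Int))) (out : Option String) : Decidable (Spec_select_best_sheet_py sheets_info out) := by unfold Spec_select_best_sheet_py; infer_instance

-- ===== CLAIM (what is proved, stated in full; the proofs are below) =====
def Claim_equal_select_best_sheet_py : Prop := ∀ (sheets_info : List (String × List (String × Int))), Dom_select_best_sheet_py sheets_info → Spec_select_best_sheet_py sheets_info (select_best_sheet_py sheets_info)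

-- ===== LEMMAS AND PROOFS =====

-- running "first maximum" step, B's first component unfused
def pvFmStep (acc : Option (String × Int)) (x : String × Int) : Option (String × Int) :=
  match acc with
  | none => some x
  | some b => if x.2 > b.2 then some x else acc

-- the candidate predicate and candidate of a sheet, as A computes them
def pvCandPred (p : String × List (String × Int)) : Bool :=
  decide (0 < PySem.Dict.getD (PySem.Dict.mk p.2) "potential_products" (0:Int))

def pvCandFun (p : String × List (String × Int)) : String × Int :=
  (p.1, PySem.Dict.getD (PySem.Dict.mk p.2) "potential_products" (0:Int) * 10 +
    (if PySem.Dict.getD (PySem.Dict.mk p.2) "duplicated_structure" (0:Int) ≠ 0 then 5 else 0))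

def pvRowsPred (p : String × List (String × Int)) : Bool :=
  decide (0 < PySem.Dict.getD (PySem.Dict.mk p.2) "rows" (0:Int))

-- head of the insertion fold = running first-maximum fold
theorem pv_insert_head (c : List (String × Int)) :
    ∀ (acc : List (String × Int)),
      (c.foldl (fun acc x => PySem.List.insertBy (fun a b => decide (b.2 < a.2)) x acc) acc).head? =
      c.foldl pvFmStep acc.head? := by
  induction c with
  | nil => intro acc; rfl
  | cons x t ih =>
    intro acc
    simp only [List.foldl_cons]
    rw [ih]
    congr 1
    cases acc with
    | nil => rfl
    | cons y ys =>
      simp only [PySem.List.insertBy, pvFmStep, List.head?]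
      by_cases h : y.2 < x.2
      · simp [h, gt_iff_lt]
      · simp [h, gt_iff_lt]

-- head of the stable reverse sort = running first-maximum fold (ties keep the first)
theorem pv_head_sorted (c : List (String × Int)) :
    (PySem.List.sorted c (fun x => x.2) true).head? = c.foldl pvFmStep none := by
  rw [PySem.List.sorted_rev_eq_foldl_insertBy]
  exact pv_insert_head c []

-- A's candidate fold is filter+map
theorem pv_cands (sheets : List (String × List (String × Int))) :
    sheets.foldl (fun acc p =>
      if 0 < PySem.Dict.getD (PySem.Dict.mk p.2) "potential_products" (0:Int) then
        let score := PySem.Dict.getD (PySem.Dict.mk p.2) "potential_products" (0:Int) * 10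
        let score := if PySem.Dict.getD (PySem.Dict.mk p.2) "duplicated_structure" (0:Int) ≠ 0 then score + 5 else score
        acc ++ [(p.1, score)]
      else acc) [] = (sheets.filter pvCandPred).map pvCandFun := by
  have h := PySem.List.foldl_append_if pvCandPred pvCandFun sheets []
  simp only [List.nil_append] at h
  rw [← h]
  apply PySem.List.foldl_congr_mem
  intro acc p _
  by_cases hp : 0 < PySem.Dict.getD (PySem.Dict.mk p.2) "potential_products" (0:Int)
  · simp only [pvCandPred, hp, decide_true, if_true, pvCandFun]
    by_cases hd : PySem.Dict.getD (PySem.Dict.mk p.2) "duplicated_structure" (0:Int) ≠ 0 <;> simp [hd, Int.mul_comm]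
  · simp [pvCandPred, hp]

-- one step of B, unfused into the two independent components
theorem pv_bstep (st : Option (String × Int) × Option String) (p : String × List (String × Int)) :
    pvBStep st p =
      ((if pvCandPred p then pvFmStep st.1 (pvCandFun p) else st.1),
       match st.2 with
       | some s => some s
       | none => if pvRowsPred p then some p.1 else none) := by
  obtain ⟨b, fn⟩ := st
  unfold pvBStep pvCandPred pvCandFun pvFmStep pvRowsPred
  by_cases hp : 0 < PySem.Dict.getD (PySem.Dict.mk p.2) "potential_products" (0:Int) <;>
    by_cases hr : 0 < PySem.Dict.getD (PySem.Dict.mk p.2) "rows" (0:Int) <;>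
      cases fn <;> cases b <;>
        simp only [hp, hr, decide_true, decide_false, if_true, if_false, Bool.false_eq_true] <;>
        first
          | rfl
          | (split_ifs <;> rfl)

-- B's fused fold, unfused
theorem pv_bfold (sheets : List (String × List (String × Int))) :
    ∀ (b : Option (String × Int)) (fn : Option String),
    sheets.foldl pvBStep (b, fn)
    = (((sheets.filter pvCandPred).map pvCandFun).foldl pvFmStep b,
       match fn with
       | some s => some s
       | none => (sheets.find? pvRowsPred).map Prod.fst) := by
  induction sheets with
  | nil => intro b fn; cases fn <;> rfl
  | cons p t ih =>
    intro b fn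
    simp only [List.foldl_cons]
    rw [pv_bstep, ih]
    by_cases hp : pvCandPred p <;> by_cases hr : pvRowsPred p <;> cases fn <;>
      simp [hp, hr]

-- ===== VERDICT (by name: the statement is the Claim_ definition above) =====
theorem select_best_sheet_py_spec : Claim_equal_select_best_sheet_py := by
  intro sheets _
  unfold Spec_select_best_sheet_py select_best_sheet_py select_best_sheet_py_alt
  rw [pv_bfold sheets none none]
  rw [pv_cands sheets]
  by_cases hnil : sheets = []
  · subst hnil; rfl
  · simp only [hnil, if_false]
    set c := (sheets.filter pvCandPred).map pvCandFun with hc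
    by_cases hce : c ≠ []
    · rw [if_pos hce]
      have hh := pv_head_sorted c
      have hs : PySem.List.sorted c (fun x => x.2) true ≠ [] := by
        simpa [PySem.List.sorted_eq_nil_iff] using hce
      cases hsort : PySem.List.sorted c (fun x => x.2) true with
      | nil => exact absurd hsort hs
      | cons m t =>
        rw [hsort] at hh
        simp only [List.head?] at hh
        rw [← hh]
    · rw [if_neg hce]
      have hc0 : c = [] := by simpa using hce
      rw [hc0]
      rfl
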